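-- pv_equiv track=rewrite | github.com/eliottcassidy2000/math | 04-computation/beta2_dominant_vertex.py | is_dominated_cycle
-- ===== SOURCE A (Python) =====
-- def is_dominated_cycle(A, n, cycle_verts):
--     """Check if any external vertex dominates or is dominated by all cycle verts."""
--     a, b, c = cycle_verts
--     for d in range(n):
--         if d in (a, b, c):
--             continue
--         # d dominates all?
--         if A[d][a] and A[d][b] and A[d][c]:
--             return True
--         # d dominated by all?
--         if A[a][d] and A[b][d] and A[c][d]:
--             return True
--     return False
-- ===== SOURCE B (Python) =====
-- def is_dominated_cycle(A, n, cycle_verts):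
--     """Check if any external vertex dominates or is dominated by all cycle verts."""
--     a, b, c = cycle_verts
--     in_a = {d for d in range(n) if A[d][a]}
--     in_b = {d for d in range(n) if A[d][b]}
--     in_c = {d for d in range(n) if A[d][c]}
--     out_a = {d for d in range(n) if A[a][d]}
--     out_b = {d for d in range(n) if A[b][d]}
--     out_c = {d for d in range(n) if A[c][d]}
--     dominators = in_a & in_b & in_c
--     dominated = out_a & out_b & out_c
--     return bool((dominators | dominated) - {a, b, c})
-- ===== Notes on version B (the rewrite author's own statement) =====
-- stated objective: alternative
-- what changed: Replaces A's single short-circuiting per-vertex scan with building six in/out neighborhood index sets over range(n), intersecting them into dominator/dominated sets, and testing non-emptiness after subtracting the cycle vertices.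
-- outside the precondition, e.g. on is_dominated_cycle([[1, 1], [1, 1]], 2, (0, 1, 5)): A returns False, B raises IndexError; on is_dominated_cycle([[0, 0], [0, 0]], 2, (0, 5, 6)): A returns False, B raises IndexError
import Mathlib
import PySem

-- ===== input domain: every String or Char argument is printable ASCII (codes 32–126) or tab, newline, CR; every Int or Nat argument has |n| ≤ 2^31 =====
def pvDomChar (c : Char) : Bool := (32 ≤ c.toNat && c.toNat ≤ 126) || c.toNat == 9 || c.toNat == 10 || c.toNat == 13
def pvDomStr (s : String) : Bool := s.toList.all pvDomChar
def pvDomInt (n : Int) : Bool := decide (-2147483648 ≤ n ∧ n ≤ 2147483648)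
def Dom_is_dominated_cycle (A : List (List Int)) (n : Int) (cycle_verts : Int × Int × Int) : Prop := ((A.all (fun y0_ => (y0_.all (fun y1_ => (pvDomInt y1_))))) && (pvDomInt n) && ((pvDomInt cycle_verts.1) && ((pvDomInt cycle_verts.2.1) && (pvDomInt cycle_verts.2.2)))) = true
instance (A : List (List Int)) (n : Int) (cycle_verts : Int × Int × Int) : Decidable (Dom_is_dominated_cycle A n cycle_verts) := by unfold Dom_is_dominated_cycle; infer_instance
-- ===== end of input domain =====

-- B builds six in/out neighborhood index sets over range(n) and intersects them,
-- instead of A's single short-circuiting per-vertex scan (objective: alternative, same cost).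
-- Equivalence is claimed on Pre_ (well-formed square matrix, in-range cycle vertices).

-- A[i][j] with Python indexing (negative wraps); default only fires outside Pre_.
def pvCell (A : List (List Int)) (i j : Int) : Int :=
  PySem.List.pyGetD (PySem.List.pyGetD A i []) j 0

-- ===== PORT A =====
def pvLoopA (A : List (List Int)) (a b c : Int) : List Int → Bool
  | [] => false
  | d :: rest =>
    if d = a ∨ d = b ∨ d = c then pvLoopA A a b c rest
    else if pvCell A d a ≠ 0 ∧ pvCell A d b ≠ 0 ∧ pvCell A d c ≠ 0 then true
    else if pvCell A a d ≠ 0 ∧ pvCell A b d ≠ 0 ∧ pvCell A c d ≠ 0 then true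
    else pvLoopA A a b c rest

def is_dominated_cycle (A : List (List Int)) (n : Int) (cycle_verts : Int × Int × Int) : Bool :=
  pvLoopA A cycle_verts.1 cycle_verts.2.1 cycle_verts.2.2 (PySem.List.pyRange 0 n 1)

-- ===== PORT B =====
-- in-neighbors of x among 0..n-1 (the set comprehension {d for d in range(n) if A[d][x]})
def pvInSet (A : List (List Int)) (n x : Int) : List Int :=
  (PySem.List.pyRange 0 n 1).filter (fun d => pvCell A d x != 0)

-- out-neighbors of x among 0..n-1
def pvOutSet (A : List (List Int)) (n x : Int) : List Int :=
  (PySem.List.pyRange 0 n 1).filter (fun d => pvCell A x d != 0)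

def is_dominated_cycle_alt (A : List (List Int)) (n : Int) (cycle_verts : Int × Int × Int) : Bool :=
  let a := cycle_verts.1
  let b := cycle_verts.2.1
  let c := cycle_verts.2.2
  let dominators := ((pvInSet A n a).filter (fun d => (pvInSet A n b).contains d)).filter
      (fun d => (pvInSet A n c).contains d)
  let dominated := ((pvOutSet A n a).filter (fun d => (pvOutSet A n b).contains d)).filter
      (fun d => (pvOutSet A n c).contains d)
  let union := dominators ++ dominated.filter (fun d => !dominators.contains d)
  let res := union.filter (fun d => !(d == a || d == b || d == c))
  !res.isEmpty

-- ===== PRECONDITION & SPEC =====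
-- Pre_ admits the natural domain: either an empty loop (n ≤ 0), or a square adjacency
-- matrix with n ≤ len(A) and cycle vertices valid Python indices (negative wraps).
-- It excludes ragged/undersized matrices and out-of-range cycle vertices, on which the
-- Python A raises IndexError — except that A, indexing lazily with short-circuiting,
-- may still return before reaching an out-of-range access; B indexes eagerly and raises there.
def Pre_is_dominated_cycle (A : List (List Int)) (n : Int) (cycle_verts : Int × Int × Int) : Prop :=
  n ≤ 0 ∨
  (n ≤ A.length ∧ (∀ row ∈ A, row.length = A.length) ∧
   (-(A.length : Int) ≤ cycle_verts.1 ∧ cycle_verts.1 < A.length) ∧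
   (-(A.length : Int) ≤ cycle_verts.2.1 ∧ cycle_verts.2.1 < A.length) ∧
   (-(A.length : Int) ≤ cycle_verts.2.2 ∧ cycle_verts.2.2 < A.length))
instance (A : List (List Int)) (n : Int) (cycle_verts : Int × Int × Int) : Decidable (Pre_is_dominated_cycle A n cycle_verts) := by unfold Pre_is_dominated_cycle; infer_instance

def pvWitness_is_dominated_cycle : List (List Int) × Int × (Int × Int × Int) :=
  ([[0, 1, 1, 1], [0, 0, 1, 1], [1, 0, 0, 1], [0, 0, 0, 0]], 4, (0, 1, 2))

def Spec_is_dominated_cycle (A : List (List Int)) (n : Int) (cycle_verts : Int × Int × Int) (out : Bool) : Prop := out = is_dominated_cycle_alt A n cycle_verts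
instance (A : List (List Int)) (n : Int) (cycle_verts : Int × Int × Int) (out : Bool) : Decidable (Spec_is_dominated_cycle A n cycle_verts out) := by unfold Spec_is_dominated_cycle; infer_instance

-- ===== CLAIM (what is proved, stated in full; the proofs are below) =====
def Claim_equal_is_dominated_cycle : Prop := ∀ (A : List (List Int)) (n : Int) (cycle_verts : Int × Int × Int), Dom_is_dominated_cycle A n cycle_verts → Pre_is_dominated_cycle A n cycle_verts → Spec_is_dominated_cycle A n cycle_verts (is_dominated_cycle A n cycle_verts)

-- ===== LEMMAS AND PROOFS =====

-- A's scan over any index list is an 'any' of the per-vertex predicate.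
theorem pvLoopA_eq_any (A : List (List Int)) (a b c : Int) (L : List Int) :
    pvLoopA A a b c L
      = L.any (fun d => decide (¬(d = a ∨ d = b ∨ d = c) ∧
          ((pvCell A d a ≠ 0 ∧ pvCell A d b ≠ 0 ∧ pvCell A d c ≠ 0) ∨
           (pvCell A a d ≠ 0 ∧ pvCell A b d ≠ 0 ∧ pvCell A c d ≠ 0)))) := by
  induction L with
  | nil => simp [pvLoopA]
  | cons d rest ih =>
    simp only [pvLoopA, List.any_cons, ih]
    by_cases h1 : d = a ∨ d = b ∨ d = c
    · simp [h1]
    · by_cases h2 : pvCell A d a ≠ 0 ∧ pvCell A d b ≠ 0 ∧ pvCell A d c ≠ 0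
      · simp [h1, h2]
      · by_cases h3 : pvCell A a d ≠ 0 ∧ pvCell A b d ≠ 0 ∧ pvCell A c d ≠ 0
        · simp [h1, h2, h3]
        · simp [h1, h2, h3]

-- B is the same 'any' of that predicate (set membership unfolds to the comprehension filters).
theorem alt_eq_any (A : List (List Int)) (n : Int) (cv : Int × Int × Int) :
    is_dominated_cycle_alt A n cv
      = (PySem.List.pyRange 0 n 1).any (fun d => decide (¬(d = cv.1 ∨ d = cv.2.1 ∨ d = cv.2.2) ∧
          ((pvCell A d cv.1 ≠ 0 ∧ pvCell A d cv.2.1 ≠ 0 ∧ pvCell A d cv.2.2 ≠ 0) ∨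
           (pvCell A cv.1 d ≠ 0 ∧ pvCell A cv.2.1 d ≠ 0 ∧ pvCell A cv.2.2 d ≠ 0)))) := by
  rw [Bool.eq_iff_iff]
  simp only [is_dominated_cycle_alt, pvInSet, pvOutSet, Bool.not_eq_eq_eq_not, Bool.not_true,
    List.isEmpty_eq_false_iff_exists_mem, List.mem_filter, List.mem_append, List.any_eq_true,
    List.contains_eq_mem, decide_eq_true_eq, decide_eq_false_iff_not, Bool.or_eq_false_iff,
    beq_eq_false_iff_ne, bne_iff_ne, ne_eq]
  constructor
  · rintro ⟨x, hx, hne⟩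
    exact ⟨x, by tauto, by tauto⟩
  · rintro ⟨x, hx, hp⟩
    refine ⟨x, ?_, by tauto⟩
    tauto

theorem is_dominated_cycle_spec : Claim_equal_is_dominated_cycle := by
  intro A n cv _ _
  unfold Spec_is_dominated_cycle
  rw [is_dominated_cycle, pvLoopA_eq_any, alt_eq_any]
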